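-- pv_equiv track=rewrite | github.com/an3ks/ASD-ITMO-2024 | lab4/task6/src/ex6.py | queue_min
-- ===== SOURCE A (Python) =====
-- def queue_min(n, arr):
--     res = []
--     queue = []
--     for cm in arr:
--         if cm[0] == "+":
--             queue.append(int(cm[1]))
--         elif cm[0] == "-":
--             queue.pop(0)
--         elif cm[0] == "?":
--             mn = 10 ** 10
--             for i in queue:
--                 if i < mn:
--                     mn = i
--             res.append(mn)
--     return res
-- ===== SOURCE B (Python) =====
-- def queue_min(n, arr):
--     # Min-queue via two stacks, each entry (value, min-of-stack): a query reads only the stack tops.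
--     INF = 10 ** 10
--     res = []
--     back = []    # push side; top at end
--     front = []   # pop side; top at end
--     for cm in arr:
--         if cm[0] == "+":
--             v = int(cm[1])
--             back.append((v, v if not back or v < back[-1][1] else back[-1][1]))
--         elif cm[0] == "-":
--             if not front:
--                 while back:
--                     v, _ = back.pop()
--                     front.append((v, v if not front or v < front[-1][1] else front[-1][1]))
--             front.pop()
--         elif cm[0] == "?":
--             m = INF
--             if front and front[-1][1] < m:
--                 m = front[-1][1]
--             if back and back[-1][1] < m:
--                 m = back[-1][1]
--             res.append(m)
--     return res
-- ===== Notes on version B (the rewrite author's own statement) =====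
-- stated objective: alternative
-- what changed: replaced the rescan of the whole queue at every '?' query (and list.pop(0)) by a two-stack min-queue that stores a running minimum with each element, so a query reads only the two stack tops
import Mathlib
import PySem

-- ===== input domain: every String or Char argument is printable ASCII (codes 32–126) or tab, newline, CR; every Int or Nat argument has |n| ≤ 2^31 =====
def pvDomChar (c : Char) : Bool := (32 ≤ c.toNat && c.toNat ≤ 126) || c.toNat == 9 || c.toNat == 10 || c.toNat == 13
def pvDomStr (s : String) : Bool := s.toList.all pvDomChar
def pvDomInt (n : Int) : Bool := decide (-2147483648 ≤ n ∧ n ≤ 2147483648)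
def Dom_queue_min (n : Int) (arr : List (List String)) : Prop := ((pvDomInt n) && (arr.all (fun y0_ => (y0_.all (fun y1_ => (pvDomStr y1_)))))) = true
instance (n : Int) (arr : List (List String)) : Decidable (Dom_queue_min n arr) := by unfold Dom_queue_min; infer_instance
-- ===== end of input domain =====

-- B replaces A's per-query rescan of the whole queue by a two-stack min-queue:
-- each stack entry carries a running minimum, so a query reads only the two stack tops.

-- ===== PORT A =====
-- inner 'for i in queue: if i < mn: mn = i'
def pyMinA (mn i : Int) : Int := if i < mn then i else mn

-- one iteration of A's loop over the commands; state = (res, queue)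
-- (cm[0]/cm[1]/int() raise in Python on malformed commands, pop(0) raises on an
--  empty queue: those inputs are outside Pre_, the defaults here are never reached inside it)
def stepA (st : List Int × List Int) (cm : List String) : List Int × List Int :=
  if cm.headD "" = "+" then (st.1, st.2 ++ [(PySem.Int.ofStr? (cm.getD 1 "")).getD 0])
  else if cm.headD "" = "-" then (st.1, st.2.tail)
  else if cm.headD "" = "?" then (st.1 ++ [st.2.foldl pyMinA (10 ^ 10)], st.2)
  else st

def queue_min (n : Int) (arr : List (List String)) : List Int :=
  (arr.foldl stepA ([], [])).1

-- ===== PORT B =====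
-- push (v, running minimum) onto a stack (top = head)
def pushMin (s : List (Int × Int)) (v : Int) : List (Int × Int) :=
  (v, match s with | [] => v | (_, m) :: _ => if v < m then v else m) :: s

-- 'while back: front.append(...)' — move everything from back onto front
def moveAll : List (Int × Int) → List (Int × Int) → List (Int × Int)
  | [], front => front
  | (v, _) :: rest, front => moveAll rest (pushMin front v)

-- the '?' branch of B's loop: m = INF, lowered by the front then the back top minimum
def queryMin (back front : List (Int × Int)) : Int :=
  let m1 : Int := match front with | [] => 10 ^ 10 | (_, m) :: _ => if m < 10 ^ 10 then m else 10 ^ 10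
  match back with | [] => m1 | (_, m) :: _ => if m < m1 then m else m1

-- one iteration of B's loop; state = (res, back, front)
def stepB (st : List Int × List (Int × Int) × List (Int × Int)) (cm : List String) :
    List Int × List (Int × Int) × List (Int × Int) :=
  if cm.headD "" = "+" then
    (st.1, pushMin st.2.1 ((PySem.Int.ofStr? (cm.getD 1 "")).getD 0), st.2.2)
  else if cm.headD "" = "-" then
    let p := if st.2.2.isEmpty then (([] : List (Int × Int)), moveAll st.2.1 st.2.2) else (st.2.1, st.2.2)
    (st.1, p.1, p.2.tail)
  else if cm.headD "" = "?" then
    (st.1 ++ [queryMin st.2.1 st.2.2], st.2.1, st.2.2)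
  else st

def queue_min_alt (n : Int) (arr : List (List String)) : List Int :=
  (arr.foldl stepB ([], [], [])).1

-- ===== PRECONDITION & SPEC =====
-- Pre_ excludes exactly the inputs where Python A raises: an empty command (cm[0] → IndexError),
-- a "+" command without a parsable integer argument (IndexError/ValueError), and a "-" command
-- reaching an empty queue (pop(0) → IndexError).
def Pre_queue_min (n : Int) (arr : List (List String)) : Prop :=
  (∀ cm ∈ arr, cm ≠ [] ∧ (cm.headD "" = "+" → 2 ≤ cm.length ∧ (PySem.Int.ofStr? (cm.getD 1 "")).isSome)) ∧
  (∀ i ∈ List.range arr.length, (arr.getD i []).headD "" = "-" →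
    (arr.take i).countP (fun cm => cm.headD "" == "-") < (arr.take i).countP (fun cm => cm.headD "" == "+"))
instance (n : Int) (arr : List (List String)) : Decidable (Pre_queue_min n arr) := by
  unfold Pre_queue_min; infer_instance

def pvWitness_queue_min : Int × List (List String) :=
  (3, [["+", "2"], ["?"], ["+", "1"], ["?"], ["-"], ["?"]])

def Spec_queue_min (n : Int) (arr : List (List String)) (out : List Int) : Prop := out = queue_min_alt n arr
instance (n : Int) (arr : List (List String)) (out : List Int) : Decidable (Spec_queue_min n arr out) := by unfold Spec_queue_min; infer_instance

-- ===== CLAIM (what is proved, stated in full; the proofs are below) =====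
def Claim_equal_queue_min : Prop := ∀ (n : Int) (arr : List (List String)), Dom_queue_min n arr → Pre_queue_min n arr → Spec_queue_min n arr (queue_min n arr)

-- ===== LEMMAS AND PROOFS =====

-- the values held by a stack, top first
def stackVals (s : List (Int × Int)) : List Int := s.map Prod.fst

-- each stack entry's second component is the minimum of the values at or below it
def good : List (Int × Int) → Prop
  | [] => True
  | (v, m) :: rest =>
      good rest ∧ m = (match rest with | [] => v | (_, m') :: _ => if v < m' then v else m')

-- a with the stack's top running minimum folded in
def topWith (a : Int) (s : List (Int × Int)) : Int :=
  match s with | [] => a | (_, m) :: _ => min a m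

theorem pyMinA_eq_min (a b : Int) : pyMinA a b = min a b := by
  unfold pyMinA; omega

theorem foldl_pyMinA (xs : List Int) (a : Int) : xs.foldl pyMinA a = xs.foldl min a := by
  induction xs generalizing a with
  | nil => rfl
  | cons x xs ih => simp [List.foldl, pyMinA_eq_min, ih]

theorem foldl_min_comm (xs : List Int) (a b : Int) :
    xs.foldl min (min a b) = min b (xs.foldl min a) := by
  induction xs generalizing a with
  | nil => simp [min_comm]
  | cons x xs ih =>
      simp only [List.foldl]
      rw [show min (min a b) x = min (min a x) b by omega, ih]

theorem foldl_min_reverse (xs : List Int) (a : Int) :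
    xs.reverse.foldl min a = xs.foldl min a := by
  induction xs generalizing a with
  | nil => rfl
  | cons x xs ih =>
      simp only [List.reverse_cons, List.foldl_append, List.foldl, ih]
      rw [foldl_min_comm xs a x]
      omega

theorem good_pushMin (s : List (Int × Int)) (v : Int) (h : good s) : good (pushMin s v) := by
  simp [pushMin, good, h]

theorem good_tail (s : List (Int × Int)) (h : good s) : good s.tail := by
  cases s with
  | nil => trivial
  | cons p rest => cases p; exact h.1

theorem good_moveAll (b f : List (Int × Int)) (hf : good f) : good (moveAll b f) := by
  induction b generalizing f with
  | nil => simpa [moveAll] using hf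
  | cons p rest ih => cases p; exact ih _ (good_pushMin _ _ hf)

theorem stackVals_cons (v m : Int) (s : List (Int × Int)) :
    stackVals ((v, m) :: s) = v :: stackVals s := rfl

theorem stackVals_pushMin (s : List (Int × Int)) (v : Int) :
    stackVals (pushMin s v) = v :: stackVals s := by
  simp [pushMin, stackVals]

theorem stackVals_moveAll (b f : List (Int × Int)) :
    stackVals (moveAll b f) = (stackVals b).reverse ++ stackVals f := by
  induction b generalizing f with
  | nil => simp [moveAll, stackVals]
  | cons p rest ih =>
      obtain ⟨v, m⟩ := p
      rw [show moveAll ((v, m) :: rest) f = moveAll rest (pushMin f v) from rfl,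
          ih, stackVals_pushMin, stackVals_cons]
      simp

theorem stackVals_tail (s : List (Int × Int)) :
    stackVals s.tail = (stackVals s).tail := by
  cases s <;> simp [stackVals]

-- the top running minimum of a good stack computes the fold-min over its values
theorem good_fold_min (s : List (Int × Int)) (h : good s) (a : Int) :
    (stackVals s).foldl min a = topWith a s := by
  induction s generalizing a with
  | nil => rfl
  | cons p rest ih =>
      obtain ⟨v, m⟩ := p
      obtain ⟨hg, hm⟩ := h
      rw [stackVals_cons]
      simp only [List.foldl]
      rw [ih hg (min a v)]
      cases rest with
      | nil => simp only [topWith] at hm ⊢; omega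
      | cons q t =>
          obtain ⟨v', m'⟩ := q
          simp only [topWith] at hm ⊢
          omega

-- A's rescan of the whole queue equals B's top-of-stacks query on two good stacks
theorem query_eq (back front : List (Int × Int)) (hb : good back) (hf : good front) :
    (stackVals front ++ (stackVals back).reverse).foldl pyMinA (10 ^ 10) =
      queryMin back front := by
  rw [foldl_pyMinA, List.foldl_append, foldl_min_reverse,
      good_fold_min front hf, good_fold_min back hb]
  cases front with
  | nil =>
      cases back with
      | nil => simp [topWith, queryMin]
      | cons q t => obtain ⟨v, m⟩ := q; simp only [topWith, queryMin]; omega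
  | cons p f =>
      obtain ⟨v, m⟩ := p
      cases back with
      | nil => simp only [topWith, queryMin]; omega
      | cons q t => obtain ⟨v', m'⟩ := q; simp only [topWith, queryMin]; omega

-- invariant linking A's queue to B's two stacks, pushed through the whole fold
theorem main_inv (arr : List (List String)) :
    ∀ (res queue : List Int) (back front : List (Int × Int)),
      queue = stackVals front ++ (stackVals back).reverse →
      good back → good front →
      (arr.foldl stepA (res, queue)).1 = (arr.foldl stepB (res, back, front)).1 := by
  induction arr with
  | nil => intro res queue back front _ _ _; rfl
  | cons cm rest ih =>
      intro res queue back front hq hb hf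
      simp only [List.foldl]
      by_cases h1 : cm.headD "" = "+"
      · simp only [stepA, stepB, h1, reduceIte]
        exact ih _ _ _ _
          (by simp [hq, stackVals_pushMin]) (good_pushMin _ _ hb) hf
      · by_cases h2 : cm.headD "" = "-"
        · cases front with
          | nil =>
              simp only [stepA, stepB, h2, List.isEmpty_nil, reduceIte]
              refine ih _ _ _ _ ?_ trivial (good_tail _ (good_moveAll _ _ hf))
              rw [stackVals_tail, stackVals_moveAll]
              simp [hq, stackVals]
          | cons p f =>
              obtain ⟨v, m⟩ := p
              simp only [stepA, stepB, h2, List.isEmpty_cons, reduceIte]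
              refine ih _ _ _ _ ?_ hb (good_tail _ hf)
              simp [hq, stackVals_cons]
        · by_cases h3 : cm.headD "" = "?"
          · simp only [stepA, stepB, h3, reduceIte]
            rw [hq, query_eq back front hb hf]
            exact ih _ _ _ _ rfl hb hf
          · simp only [stepA, stepB, h1, h2, h3, ite_false]
            exact ih _ _ _ _ hq hb hf

-- ===== VERDICT (by name: the statement is the Claim_ definition above) =====
theorem queue_min_spec : Claim_equal_queue_min := by
  intro n arr _ _
  unfold Spec_queue_min queue_min queue_min_alt
  exact main_inv arr [] [] [] [] rfl trivial trivial
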